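-- pv_equiv track=rewrite | github.com/harinpulkaram/hw8.5-hpulkaram1 | 4055e80c399eea9357daabd3c2360455-e4034af8ec5e6f7647c2a38bd4e9cd231aacaf99/messy_function.py | mod2
-- ===== SOURCE A (Python) =====
-- def mod1(s: int) -> int:
--     """
--     Determines if number is zero or one, if it is, does not run the remainder of the functon
--     """
--     if s < 1:
--         return 0
--     return 1
--
-- def mod2(s:int) -> int:
--     """
--     finding the closest power of two to the given integer, return the closest power
--     """
--     if mod1(s) == 0:
--         pow = 0
--         return pow
--     else:
--         pow = 0
--         while 2 ** pow < s:
--             pow += 1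
--         pow -= 1
--         return pow
-- ===== SOURCE B (Python) =====
-- def mod2(s: int) -> int:
--     """closed form: for s >= 1 the loop's answer is (s-1).bit_length() - 1"""
--     if s < 1:
--         return 0
--     return (s - 1).bit_length() - 1
-- ===== Notes on version B (the rewrite author's own statement) =====
-- stated objective: idiomatic
-- what changed: Replaced the while-loop that counts powers of two with the constant-time closed form (s-1).bit_length()-1 for s >= 1.
import Mathlib
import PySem

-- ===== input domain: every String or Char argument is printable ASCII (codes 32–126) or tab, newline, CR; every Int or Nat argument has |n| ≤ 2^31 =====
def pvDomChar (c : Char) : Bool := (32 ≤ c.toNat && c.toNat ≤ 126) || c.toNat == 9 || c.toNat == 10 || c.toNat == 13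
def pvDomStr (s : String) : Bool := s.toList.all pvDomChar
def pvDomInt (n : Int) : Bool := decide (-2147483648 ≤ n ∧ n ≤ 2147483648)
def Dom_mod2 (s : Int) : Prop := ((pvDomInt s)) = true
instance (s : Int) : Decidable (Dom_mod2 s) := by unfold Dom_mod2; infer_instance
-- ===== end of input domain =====

-- B replaces A's while-loop with the constant-time closed form (s-1).bit_length() - 1 (idiomatic).

-- ===== PORT A =====
def mod1 (s : Int) : Int :=
  if s < 1 then 0 else 1

-- the while-loop 'while 2 ** pow < s: pow += 1'; fuel 64 only makes the loop total
-- (under Dom_mod2, s ≤ 2^31, so at most 32 iterations are ever taken)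
def mod2Loop (fuel : Nat) (pow : Int) (s : Int) : Int :=
  match fuel with
  | 0 => pow
  | fuel + 1 => if 2 ^ pow.toNat < s then mod2Loop fuel (pow + 1) s else pow

def mod2 (s : Int) : Int :=
  if mod1 s = 0 then 0
  else mod2Loop 64 0 s - 1

-- ===== PORT B =====
def mod2_alt (s : Int) : Int :=
  if s < 1 then 0
  else (PySem.Int.bitLength (s - 1) : Int) - 1

-- ===== PRECONDITION & SPEC =====
def Spec_mod2 (s : Int) (out : Int) : Prop := out = mod2_alt s
instance (s : Int) (out : Int) : Decidable (Spec_mod2 s out) := by unfold Spec_mod2; infer_instance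

-- ===== CLAIM (what is proved, stated in full; the proofs are below) =====
def Claim_equal_mod2 : Prop := ∀ (s : Int), Dom_mod2 s → Spec_mod2 s (mod2 s)

-- ===== LEMMAS AND PROOFS =====

-- bitLength of a nonnegative integer is ≤ p iff the integer is < 2^p
lemma bitLength_le_iff (m : Int) (hm : 0 ≤ m) (p : Nat) :
    PySem.Int.bitLength m ≤ p ↔ m.natAbs < 2 ^ p := by
  constructor
  · intro h
    calc m.natAbs < 2 ^ PySem.Int.bitLength m := PySem.Int.lt_two_pow_bitLength m
    _ ≤ 2 ^ p := Nat.pow_le_pow_right (by norm_num) h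
  · intro h
    by_contra hlt
    push_neg at hlt
    rcases eq_or_ne m 0 with rfl | hne
    · simp [PySem.Int.bitLength_zero] at hlt
    · have h1 : 2 ^ (PySem.Int.bitLength m - 1) ≤ m.natAbs :=
        PySem.Int.two_pow_bitLength_le m hne
      have h2 : 2 ^ p ≤ 2 ^ (PySem.Int.bitLength m - 1) :=
        Nat.pow_le_pow_right (by norm_num) (by omega)
      omega

lemma loop_eq (s : Int) (hs : 1 ≤ s) :
    ∀ (fuel p : Nat), p ≤ PySem.Int.bitLength (s - 1) →
      PySem.Int.bitLength (s - 1) ≤ p + fuel →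
      mod2Loop fuel (p : Int) s = (PySem.Int.bitLength (s - 1) : Int) := by
  intro fuel
  induction fuel with
  | zero =>
    intro p h1 h2
    simp only [mod2Loop]
    omega
  | succ fuel ih =>
    intro p h1 h2
    have hm : (0:Int) ≤ s - 1 := by omega
    have hiff := bitLength_le_iff (s - 1) hm p
    have habs : (s - 1).natAbs = (s - 1).toNat := Int.natAbs_of_nonneg hm ▸ rfl
    simp only [mod2Loop, Int.toNat_natCast]
    by_cases hc : (2:Int) ^ p < s
    · -- loop continues: 2^p ≤ s - 1, so p < bitLength (s-1)
      have hlt : (s - 1).natAbs ≥ 2 ^ p := by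
        have : ((2:Int) ^ p) ≤ s - 1 := by omega
        have h2p : ((2 ^ p : Nat) : Int) = (2:Int) ^ p := by push_cast; ring
        omega
      have hp : p < PySem.Int.bitLength (s - 1) := by
        by_contra hnp
        push_neg at hnp
        exact absurd (hiff.mp hnp) (by omega)
      rw [if_pos hc]
      have : ((p:Int) + 1) = ((p + 1 : Nat) : Int) := by push_cast; ring
      rw [this]
      exact ih (p + 1) (by omega) (by omega)
    · -- loop stops: s ≤ 2^p, so bitLength (s-1) ≤ p, combined with h1: equal
      have hle : (s - 1).natAbs < 2 ^ p := by
        have : s - 1 < (2:Int) ^ p := by omega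
        have h2p : ((2 ^ p : Nat) : Int) = (2:Int) ^ p := by push_cast; ring
        omega
      have := hiff.mpr hle
      rw [if_neg hc]
      omega

-- ===== VERDICT (by name: the statement is the Claim_ definition above) =====
theorem mod2_spec : Claim_equal_mod2 := by
  intro s hdom
  unfold Spec_mod2 mod2 mod2_alt mod1
  by_cases hs : s < 1
  · simp [hs]
  · push_neg at hs
    have hdom' : s ≤ 2147483648 := by
      simp only [Dom_mod2, pvDomInt, decide_eq_true_eq] at hdom
      exact hdom.2
    have hB : PySem.Int.bitLength (s - 1) ≤ 64 := by
      rw [bitLength_le_iff (s - 1) (by omega)]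
      have : (s - 1).natAbs ≤ 2147483647 := by omega
      calc (s - 1).natAbs ≤ 2147483647 := this
      _ < 2 ^ 64 := by norm_num
    have h0 : ((0:Nat) : Int) = (0:Int) := rfl
    have := loop_eq s hs 64 0 (Nat.zero_le _) (by omega)
    rw [h0] at this
    simp only [hs, if_neg (by omega : ¬ s < 1), if_neg (by norm_num : (1:Int) ≠ 0), this]
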